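-- pv_equiv track=rewrite | github.com/sparkcyf/DeepSME_DNA_Storage_Decode_scripts | sustech_decode.py | unpack_vbits
-- ===== SOURCE A (Python) =====
-- def unpack_vbits(msg, pattern):
--     """
--     将msg转化成二进制数据, little-endian
--     :param msg: 输入数据
--     :param pattern: 进行哈希变换时的数据位
--     :return: 二进制数据
--     """
--     vbits = []
--     for word in msg:
--         mask = 1
--         for _ in range(pattern):
--             vbits.append((word & mask))
--             word = word >> 1
--     # for i in range(pattern - 1):
--     #     vbits.append(0)
--     return vbits
-- ===== SOURCE B (Python) =====
-- def unpack_vbits(msg, pattern):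
--     """
--     将msg转化成二进制数据, little-endian
--     :param msg: 输入数据
--     :param pattern: 进行哈希变换时的数据位
--     :return: 二进制数据
--     """
--     vbits = []
--     if pattern > 0:
--         mask = (1 << pattern) - 1
--         for word in msg:
--             s = format(word & mask, '0{}b'.format(pattern))
--             vbits.extend(1 if c == '1' else 0 for c in reversed(s))
--     return vbits
-- ===== Notes on version B (the rewrite author's own statement) =====
-- stated objective: alternative
-- what changed: Replaces A's per-bit shift-and-mask inner loop with a format-then-parse strategy: each word is masked to its low `pattern` bits once, rendered as a zero-padded binary string with format(), and the reversed string's characters are emitted as 0/1 ints.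
import Mathlib
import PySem

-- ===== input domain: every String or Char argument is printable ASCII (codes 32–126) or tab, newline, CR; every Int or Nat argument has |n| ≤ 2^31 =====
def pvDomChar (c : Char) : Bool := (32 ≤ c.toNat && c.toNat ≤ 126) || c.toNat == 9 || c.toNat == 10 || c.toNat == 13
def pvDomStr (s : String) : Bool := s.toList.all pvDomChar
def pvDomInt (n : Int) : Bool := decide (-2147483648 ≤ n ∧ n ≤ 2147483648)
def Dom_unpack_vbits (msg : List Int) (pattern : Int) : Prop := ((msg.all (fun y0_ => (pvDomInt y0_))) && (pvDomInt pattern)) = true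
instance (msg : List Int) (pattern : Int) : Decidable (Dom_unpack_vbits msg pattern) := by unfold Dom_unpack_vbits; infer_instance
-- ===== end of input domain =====

-- B replaces A's per-bit shift/AND inner loop by masking each word once and parsing its
-- zero-padded binary string in reverse (alternative decomposition, same cost).

-- ===== PORT A =====
def unpack_vbits (msg : List Int) (pattern : Int) : List Int :=
  let vbits : List Int := []
  msg.foldl
    (fun (vbits : List Int) (word : Int) =>
      let mask : Int := 1
      ((PySem.List.pyRange 0 pattern 1).foldl
        (fun (s : List Int × Int) (_ : Int) => (s.1 ++ [PySem.Int.band s.2 mask], s.2 >>> (1 : Nat)))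
        (vbits, word)).1)
    vbits

-- ===== PORT B =====
def unpack_vbits_alt (msg : List Int) (pattern : Int) : List Int :=
  if 0 < pattern then
    let mask : Int := ((1 : Int) <<< pattern.toNat) - 1
    msg.foldl
      (fun (vbits : List Int) (word : Int) =>
        -- s = format(word & mask, '0{pattern}b'): binary digits of the (nonnegative) masked
        -- word, left-padded with '0' to width pattern (exact: the masked value is ≥ 0)
        let s : List Char := PySem.Int.toBinChars (PySem.Int.band word mask)
        let padded : List Char := List.replicate (pattern.toNat - s.length) '0' ++ s
        vbits ++ padded.reverse.map (fun c => if c = '1' then (1 : Int) else 0))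
      []
  else []

-- ===== PRECONDITION & SPEC =====
def Spec_unpack_vbits (msg : List Int) (pattern : Int) (out : List Int) : Prop := out = unpack_vbits_alt msg pattern
instance (msg : List Int) (pattern : Int) (out : List Int) : Decidable (Spec_unpack_vbits msg pattern out) := by unfold Spec_unpack_vbits; infer_instance

-- ===== CLAIM (what is proved, stated in full; the proofs are below) =====
def Claim_equal_unpack_vbits : Prop := ∀ (msg : List Int) (pattern : Int), Dom_unpack_vbits msg pattern → Spec_unpack_vbits msg pattern (unpack_vbits msg pattern)

-- ===== LEMMAS AND PROOFS =====

-- A's inner loop, unrolled: bit i is ((word >> i) & 1), little-endian.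
def aBits : Int → Nat → List Int
  | _, 0 => []
  | w, n + 1 => PySem.Int.band w 1 :: aBits (w >>> (1 : Nat)) n

-- the low n base-2 digits of a natural number, little-endian, as Ints
def bBits : Nat → Nat → List Int
  | _, 0 => []
  | m, n + 1 => ((m % 2 : Nat) : Int) :: bBits (m / 2) n

theorem innerA (l : List Int) (acc : List Int) (w : Int) :
    (l.foldl (fun (s : List Int × Int) (_ : Int) =>
      (s.1 ++ [PySem.Int.band s.2 1], s.2 >>> (1 : Nat))) (acc, w)).1 = acc ++ aBits w l.length := by
  induction l generalizing acc w with
  | nil => simp [aBits]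
  | cons x xs ih =>
      simp only [List.foldl_cons, List.length_cons, aBits]
      rw [ih]
      simp

theorem bBits_zero (n : Nat) : bBits 0 n = List.replicate n 0 := by
  induction n with
  | zero => rfl
  | succ n ih => simp [bBits, ih, List.replicate_succ]

theorem aBits_eq (n : Nat) (w : Int) :
    aBits w n = bBits ((w % ((2 : Int) ^ n)).toNat) n := by
  induction n generalizing w with
  | zero => rfl
  | succ n ih =>
      have hP : (0 : Int) < 2 ^ n := by positivity
      have hP1 : (0 : Int) < 2 ^ (n + 1) := by positivity
      have hr0 : (0 : Int) ≤ w % 2 ^ (n + 1) := Int.emod_nonneg w (by positivity)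
      have hr1 : w % 2 ^ (n + 1) < 2 ^ (n + 1) := Int.emod_lt_of_pos w hP1
      simp only [aBits, bBits]
      congr 1
      · -- head: (word & 1) = low bit of the masked value
        rw [PySem.Int.band_one, PySem.Int.mod_eq_emod_of_pos (by norm_num)]
        have hcast : (((w % 2 ^ (n + 1)).toNat % 2 : Nat) : Int)
            = (w % 2 ^ (n + 1)) % 2 := by
          push_cast
          rw [Int.toNat_of_nonneg hr0]
        rw [hcast, Int.emod_emod_of_dvd w ⟨2 ^ n, by ring⟩]
      · -- tail: shifting right matches halving the masked value
        rw [ih]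
        congr 1
        have hshift : w >>> (1 : Nat) = w / 2 := by
          have := Int.shiftRight_eq_div_pow w 1
          simpa using this
        rw [hshift]
        set r := w % 2 ^ (n + 1) with hrdef
        have hw : w = r + 2 * (2 ^ n * (w / 2 ^ (n + 1))) := by
          have := Int.ediv_add_emod w (2 ^ (n + 1))
          rw [← hrdef] at this
          ring_nf
          ring_nf at this
          omega
        have h2 : w / 2 = r / 2 + 2 ^ n * (w / 2 ^ (n + 1)) := by
          conv_lhs => rw [hw]
          rw [Int.add_mul_ediv_left r _ (by norm_num : (2:Int) ≠ 0)]
        have hlt : r / 2 < 2 ^ n := by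
          rw [Int.ediv_lt_iff_lt_mul (by norm_num : (0:Int) < 2)]
          calc r < 2 ^ (n + 1) := hr1
            _ = 2 ^ n * 2 := by ring
        have h3 : (w / 2) % 2 ^ n = r / 2 := by
          rw [h2, Int.add_mul_emod_self_left,
            Int.emod_eq_of_lt (Int.ediv_nonneg hr0 (by norm_num)) hlt]
        rw [h3]
        omega

-- Python's  w & (2^p - 1)  is  w mod 2^p  (also for negative w: infinite two's complement).
theorem band_mask (w : Int) (p : Nat) :
    PySem.Int.band w ((2 : Int) ^ p - 1) = w % ((2 : Int) ^ p) := by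
  have hpowN : (1 : Nat) ≤ 2 ^ p := Nat.one_le_two_pow
  have hcastpow : ((2 : Int) ^ p) = ((2 ^ p : Nat) : Int) := by push_cast; ring
  have hmasknn : (0 : Int) ≤ (2 : Int) ^ p - 1 := by
    rw [hcastpow]; omega
  have htn : ((2 : Int) ^ p - 1).toNat = 2 ^ p - 1 := by
    rw [hcastpow]; omega
  by_cases hw : 0 ≤ w
  · rw [PySem.Int.band_of_nonneg hw hmasknn, htn, Nat.and_two_pow_sub_one_eq_mod, hcastpow]
    push_cast [Int.toNat_of_nonneg hw]
    ring
  · -- w < 0: Python's band returns M - (M & (-w-1)) with M = 2^p - 1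
    have hform : PySem.Int.band w ((2 : Int) ^ p - 1)
        = ((((2 : Int) ^ p - 1).toNat - (((2 : Int) ^ p - 1).toNat &&& (-w - 1).toNat) : Nat) : Int) := by
      simp only [PySem.Int.band, if_neg hw, if_pos hmasknn]
    set k : Nat := (-w - 1).toNat with hkdef
    have hwk : w = -(k : Int) - 1 := by omega
    have hand : (((2 : Int) ^ p - 1).toNat &&& k) = k % 2 ^ p := by
      rw [htn, Nat.and_comm, Nat.and_two_pow_sub_one_eq_mod]
    rw [hform, hand, htn]
    have hrlt : k % 2 ^ p < 2 ^ p := Nat.mod_lt _ (by positivity)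
    have hK : k = 2 ^ p * (k / 2 ^ p) + k % 2 ^ p := (Nat.div_add_mod k (2 ^ p)).symm
    have hx0 : (0 : Int) ≤ ((2 ^ p - 1 - k % 2 ^ p : Nat) : Int) := by positivity
    have hx1 : ((2 ^ p - 1 - k % 2 ^ p : Nat) : Int) < 2 ^ p := by
      rw [hcastpow]; omega
    have hdvd : ((2 : Int) ^ p) ∣ (w - ((2 ^ p - 1 - k % 2 ^ p : Nat) : Int)) := by
      refine ⟨-((k / 2 ^ p : Nat) + 1), ?_⟩
      have hKc : (k : Int) = ((2 ^ p : Nat) : Int) * ((k / 2 ^ p : Nat) : Int)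
          + ((k % 2 ^ p : Nat) : Int) := by exact_mod_cast congrArg (Nat.cast (R := Int)) hK
      have hsub : ((2 ^ p - 1 - k % 2 ^ p : Nat) : Int)
          = ((2 ^ p : Nat) : Int) - 1 - ((k % 2 ^ p : Nat) : Int) := by omega
      rw [hwk, hsub, hcastpow]
      linarith [hKc]
    have h1 : w % 2 ^ p = ((2 ^ p - 1 - k % 2 ^ p : Nat) : Int) % 2 ^ p :=
      Int.emod_eq_emod_iff_emod_sub_eq_zero.mpr (Int.emod_eq_zero_of_dvd hdvd)
    rw [Int.emod_eq_of_lt hx0 hx1] at h1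
    exact h1.symm

-- characterisation of core's Nat.toDigitsCore in base 2
theorem toDigitsCore_eq (f n : Nat) (acc : List Char) (h : n < f) :
    Nat.toDigitsCore 2 f n acc
      = (if n = 0 then ['0'] else (Nat.digits 2 n).reverse.map Nat.digitChar) ++ acc := by
  induction f generalizing n acc with
  | zero => omega
  | succ f ih =>
      rw [Nat.toDigitsCore]
      by_cases h0 : n / 2 = 0
      · rcases (show n = 0 ∨ n = 1 by omega) with h1 | h1 <;> subst h1
        · simp [Nat.digitChar]
        · simp [Nat.digitChar]
      · have hn2 : 2 ≤ n := by omega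
        simp only [h0]
        have hd : Nat.digits 2 n = n % 2 :: Nat.digits 2 (n / 2) :=
          Nat.digits_def' (by norm_num) (by omega)
        rw [ih (n / 2) _ (by omega), if_neg h0, hd, if_neg (show ¬ n = 0 by omega)]
        simp

theorem bBits_digits (p : Nat) (m : Nat) (h : m < 2 ^ p) :
    bBits m p = List.map (fun (d : Nat) => (d : Int)) (Nat.digits 2 m)
      ++ List.replicate (p - (Nat.digits 2 m).length) 0 := by
  induction p generalizing m with
  | zero =>
      have : m = 0 := by omega
      subst this; simp [bBits]
  | succ p ih =>
      by_cases h0 : m = 0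
      · subst h0
        simp [bBits_zero]
      · have hd : Nat.digits 2 m = m % 2 :: Nat.digits 2 (m / 2) :=
          Nat.digits_def' (by norm_num) (by omega)
        have hps : 2 ^ (p + 1) = 2 ^ p * 2 := pow_succ 2 p
        have hlt : m / 2 < 2 ^ p := by omega
        simp only [bBits, hd, List.length_cons]
        rw [ih (m / 2) hlt]
        simp

-- per-word equality: A's p unrolled bits = B's parsed zero-padded binary string
theorem word_eq (p : Nat) (hp : 0 < p) (m : Nat) (hm : m < 2 ^ p) :
    ((List.replicate (p - (Nat.toDigits 2 m).length) '0' ++ Nat.toDigits 2 m).reverse.map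
      (fun c => if c = '1' then (1 : Int) else 0)) = bBits m p := by
  have hTD : Nat.toDigits 2 m
      = (if m = 0 then ['0'] else (Nat.digits 2 m).reverse.map Nat.digitChar) := by
    have := toDigitsCore_eq (m + 1) m [] (by omega)
    simpa [Nat.toDigits] using this
  by_cases h0 : m = 0
  · subst h0
    rw [hTD, bBits_zero]
    cases p with
    | zero => omega
    | succ q =>
        simp [List.reverse_append, List.map_replicate, List.replicate_succ]
  · rw [hTD, if_neg h0]
    have hlen : ((Nat.digits 2 m).reverse.map Nat.digitChar).length = (Nat.digits 2 m).length := by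
      simp
    rw [hlen, List.reverse_append, List.map_reverse, List.reverse_reverse,
      List.reverse_replicate, List.map_append, List.map_map, List.map_replicate]
    rw [bBits_digits p m hm]
    have h01 : (if ('0' : Char) = '1' then (1 : Int) else 0) = 0 := by decide
    rw [h01]
    congr 1
    apply List.map_congr_left
    intro d hd
    have hdlt : d < 2 := Nat.digits_lt_base (by norm_num) hd
    interval_cases d <;> decide

theorem foldl_acc_id (l : List Int) (acc : List Int) :
    l.foldl (fun (a : List Int) (_ : Int) => a) acc = acc := by
  induction l generalizing acc with
  | nil => rfl
  | cons x xs ih => exact ih acc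

-- B's loop body computes the low-bits list of the masked word
theorem stepB (pattern : Int) (hp : 0 < pattern) (acc : List Int) (w : Int) :
    (let s : List Char := PySem.Int.toBinChars (PySem.Int.band w (((1 : Int) <<< pattern.toNat) - 1))
     let padded : List Char := List.replicate (pattern.toNat - s.length) '0' ++ s
     acc ++ padded.reverse.map (fun c => if c = '1' then (1 : Int) else 0))
    = acc ++ bBits ((w % ((2 : Int) ^ pattern.toNat)).toNat) pattern.toNat := by
  have hmask : ((1 : Int) <<< pattern.toNat) - 1 = (2 : Int) ^ pattern.toNat - 1 := by
    rw [Int.shiftLeft_eq]; ring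
  have hnn : (0 : Int) ≤ w % (2 : Int) ^ pattern.toNat := Int.emod_nonneg _ (by positivity)
  have hTB : PySem.Int.toBinChars (w % (2 : Int) ^ pattern.toNat)
      = Nat.toDigits 2 (w % (2 : Int) ^ pattern.toNat).toNat := by
    simp only [PySem.Int.toBinChars, if_neg (not_lt.mpr hnn)]
  have hmlt : ((w % (2 : Int) ^ pattern.toNat).toNat) < 2 ^ pattern.toNat := by
    have h1 : w % (2 : Int) ^ pattern.toNat < (2 : Int) ^ pattern.toNat :=
      Int.emod_lt_of_pos _ (by positivity)
    have h2 : ((2 : Int) ^ pattern.toNat) = ((2 ^ pattern.toNat : Nat) : Int) := by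
      push_cast; ring
    omega
  simp only [hmask, band_mask, hTB]
  congr 1
  exact word_eq pattern.toNat (by omega) _ hmlt

-- the two folds over msg agree word by word when pattern > 0
theorem fold_eq (pattern : Int) (hp : 0 < pattern) (msg : List Int) (acc : List Int) :
    msg.foldl (fun (vbits : List Int) (word : Int) =>
      let mask : Int := 1
      ((PySem.List.pyRange 0 pattern 1).foldl
        (fun (s : List Int × Int) (_ : Int) => (s.1 ++ [PySem.Int.band s.2 mask], s.2 >>> (1 : Nat)))
        (vbits, word)).1) acc
    = msg.foldl (fun (vbits : List Int) (word : Int) =>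
        let s : List Char := PySem.Int.toBinChars (PySem.Int.band word (((1 : Int) <<< pattern.toNat) - 1))
        let padded : List Char := List.replicate (pattern.toNat - s.length) '0' ++ s
        vbits ++ padded.reverse.map (fun c => if c = '1' then (1 : Int) else 0)) acc := by
  induction msg generalizing acc with
  | nil => rfl
  | cons x xs ih =>
      simp only [List.foldl_cons]
      rw [ih]
      congr 1
      show ((PySem.List.pyRange 0 pattern 1).foldl
        (fun (s : List Int × Int) (_ : Int) => (s.1 ++ [PySem.Int.band s.2 1], s.2 >>> (1 : Nat)))
        (acc, x)).1 = _
      rw [innerA]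
      have hlen : (PySem.List.pyRange 0 pattern 1).length = pattern.toNat := by
        rw [PySem.List.length_pyRange_one]
        congr 1
        omega
      rw [hlen, aBits_eq]
      exact (stepB pattern hp acc x).symm

-- ===== VERDICT (by name: the statement is the Claim_ definition above) =====
theorem unpack_vbits_spec : Claim_equal_unpack_vbits := by
  intro msg pattern _
  show unpack_vbits msg pattern = unpack_vbits_alt msg pattern
  unfold unpack_vbits unpack_vbits_alt
  by_cases hp : 0 < pattern
  · rw [if_pos hp]
    exact fold_eq pattern hp msg []
  · rw [if_neg hp]
    have h0 : PySem.List.pyRange 0 pattern 1 = [] := PySem.List.pyRange_one_eq_nil (by omega)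
    have hfun : (fun (vbits : List Int) (word : Int) =>
        let mask : Int := 1
        ((PySem.List.pyRange 0 pattern 1).foldl
          (fun (s : List Int × Int) (_ : Int) => (s.1 ++ [PySem.Int.band s.2 mask], s.2 >>> (1 : Nat)))
          (vbits, word)).1)
        = fun (a : List Int) (_ : Int) => a := by
      funext acc w
      rw [h0]
      rfl
    rw [hfun, foldl_acc_id]
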